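-- pv_equiv track=rewrite | github.com/timepassuser/vulnalyzer | vulnalyzer/graph/builder.py | _bfs_path_to_root
-- ===== SOURCE A (Python) =====
-- def _bfs_path_to_root(
--     start: str,
--     child_to_parents: dict[str, list[str]],
--     max_depth: int,
-- ) -> list[str] | None:
--     """
--     Walk DEPENDS_ON backwards from *start* (a vulnerable package node ID) to
--     find the shortest chain from a root package to *start*.
--     Returns the path [root, ..., start] or None if no path found within max_depth.
--     """
--     from collections import deque
--
--     queue: deque[tuple[str, list[str]]] = deque()
--     queue.append((start, [start]))
--     visited: set[str] = {start}
--     best: list[str] | None = None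
--
--     while queue:
--         node, path = queue.popleft()
--         if len(path) > max_depth:
--             continue
--
--         parents = child_to_parents.get(node, [])
--
--         if not parents:
--             candidate = list(reversed(path))
--             if best is None or len(candidate) < len(best):
--                 best = candidate
--             continue
--
--         for parent in parents:
--             if parent not in visited:
--                 visited.add(parent)
--                 queue.append((parent, path + [parent]))
--
--     return best
-- ===== SOURCE B (Python) =====
-- def _bfs_path_to_root(
--     start: str,
--     child_to_parents: dict[str, list[str]],
--     max_depth: int,
-- ) -> list[str] | None:
--     """Parent-pointer BFS: stop at the first root dequeued (BFS order makes it
--     shortest), stop altogether once the depth bound is passed (depths are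
--     nondecreasing in the queue), and rebuild the path [root, ..., start]
--     back-to-front by following predecessor pointers instead of carrying a
--     full path copy in every queue entry."""
--     from collections import deque
--
--     pred: dict[str, str | None] = {start: None}
--     queue: deque[tuple[str, int]] = deque()
--     queue.append((start, 1))
--
--     while queue:
--         node, depth = queue.popleft()
--         if depth > max_depth:
--             return None
--         parents = child_to_parents.get(node, [])
--         if not parents:
--             path = []
--             cur = node
--             while cur is not None:
--                 path.append(cur)
--                 cur = pred[cur]
--             return path
--         for parent in parents:
--             if parent not in pred:
--                 pred[parent] = node
--                 queue.append((parent, depth + 1))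
--     return None
-- ===== Notes on version B (the rewrite author's own statement) =====
-- stated objective: alternative
-- what changed: Replaces A's queue of full path copies with best-candidate accumulation by a parent-pointer BFS that returns at the first root dequeued (BFS order makes it shortest), stops once the depth bound is passed, and rebuilds the path back-to-front from predecessor pointers.
import Mathlib
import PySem

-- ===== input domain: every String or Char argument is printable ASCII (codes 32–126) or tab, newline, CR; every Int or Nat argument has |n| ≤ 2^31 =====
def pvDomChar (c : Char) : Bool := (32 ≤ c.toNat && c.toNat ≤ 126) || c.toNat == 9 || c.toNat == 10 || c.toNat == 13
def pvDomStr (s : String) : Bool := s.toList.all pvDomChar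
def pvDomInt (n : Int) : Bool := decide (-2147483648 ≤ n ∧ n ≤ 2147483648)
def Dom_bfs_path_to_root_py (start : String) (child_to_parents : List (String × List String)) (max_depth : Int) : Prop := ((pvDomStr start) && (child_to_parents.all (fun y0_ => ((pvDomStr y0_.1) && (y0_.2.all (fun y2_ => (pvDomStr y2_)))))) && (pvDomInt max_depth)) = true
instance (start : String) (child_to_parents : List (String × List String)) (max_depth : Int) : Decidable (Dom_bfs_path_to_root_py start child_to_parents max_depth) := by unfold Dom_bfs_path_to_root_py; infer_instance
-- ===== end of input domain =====

-- B replaces A's queue of full path copies and post-hoc best-keeping by a parent-pointer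
-- BFS that returns at the first root dequeued and stops once the depth bound is passed.

-- ===== PORT A =====
-- body of A's 'for parent in parents' loop: push unvisited parents with an extended path copy
def pvAstep (path : List String) (s : List (String × List String) × PySem.Set String)
    (parent : String) : List (String × List String) × PySem.Set String :=
  if parent ∈ s.2 then s
  else (s.1 ++ [(parent, path ++ [parent])], PySem.Set.add s.2 parent)

-- A's 'while queue' loop; fuel is a termination device only (each iteration pops one entry
-- and every entry is enqueued at most once, so the generous fuel below never runs out)
def pvAloop (ctp : List (String × List String)) (md : Int) :
    Nat → List (String × List String) → PySem.Set String → Option (List String) →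
    Option (List String)
  | 0, _, _, best => best
  | _ + 1, [], _, best => best
  | fuel + 1, (node, path) :: rest, visited, best =>
    if (path.length : Int) > md then pvAloop ctp md fuel rest visited best
    else
      let parents := (PySem.Dict.mk ctp).getD node []
      if parents.isEmpty then
        let candidate := path.reverse
        let best' := match best with
          | none => some candidate
          | some b => if candidate.length < b.length then some candidate else some b
        pvAloop ctp md fuel rest visited best'
      else
        let st := parents.foldl (pvAstep path) (rest, visited)
        pvAloop ctp md fuel st.1 st.2 best

def bfs_path_to_root_py (start : String) (child_to_parents : List (String × List String)) (max_depth : Int) : Option (List String) :=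
  pvAloop child_to_parents max_depth
    (2 + (child_to_parents.map (fun p => p.2.length)).sum)
    [(start, [start])] (PySem.Set.add PySem.Set.empty start) none

-- ===== PORT B =====
-- B's path reconstruction 'while cur is not None'; fuel (the number of pred entries at the
-- call site) is a termination device only: the chain visits distinct keys of pred
def pvChase (pred : PySem.Dict String (Option String)) : Nat → String → List String
  | 0, cur => [cur]
  | f + 1, cur =>
    match pred.getD cur none with
    | none => [cur]
    | some p => cur :: pvChase pred f p

-- body of B's 'for parent in parents' loop: record the predecessor, push (parent, depth+1)
def pvBstep (node : String) (depth : Int)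
    (s : List (String × Int) × PySem.Dict String (Option String))
    (p : String) : List (String × Int) × PySem.Dict String (Option String) :=
  if s.2.contains p then s
  else (s.1 ++ [(p, depth + 1)], s.2.insert p (some node))

-- B's 'while queue' loop; same generous fuel as A's, a termination device only
def pvBloop (ctp : List (String × List String)) (md : Int) :
    Nat → List (String × Int) → PySem.Dict String (Option String) → Option (List String)
  | 0, _, _ => none
  | _ + 1, [], _ => none
  | fuel + 1, (node, depth) :: rest, pred =>
    if depth > md then none
    else
      let parents := (PySem.Dict.mk ctp).getD node []
      if parents.isEmpty then some (pvChase pred pred.size node)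
      else
        let st := parents.foldl (pvBstep node depth) (rest, pred)
        pvBloop ctp md fuel st.1 st.2

def bfs_path_to_root_py_alt (start : String) (child_to_parents : List (String × List String)) (max_depth : Int) : Option (List String) :=
  pvBloop child_to_parents max_depth
    (2 + (child_to_parents.map (fun p => p.2.length)).sum)
    [(start, 1)] (PySem.Dict.empty.insert start none)

-- ===== PRECONDITION & SPEC =====
def Spec_bfs_path_to_root_py (start : String) (child_to_parents : List (String × List String)) (max_depth : Int) (out : Option (List String)) : Prop := out = bfs_path_to_root_py_alt start child_to_parents max_depth
instance (start : String) (child_to_parents : List (String × List String)) (max_depth : Int) (out : Option (List String)) : Decidable (Spec_bfs_path_to_root_py start child_to_parents max_depth out) := by unfold Spec_bfs_path_to_root_py; infer_instance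

-- ===== CLAIM (what is proved, stated in full; the proofs are below) =====
def Claim_equal_bfs_path_to_root_py : Prop := ∀ (start : String) (child_to_parents : List (String × List String)) (max_depth : Int), Dom_bfs_path_to_root_py start child_to_parents max_depth → Spec_bfs_path_to_root_py start child_to_parents max_depth (bfs_path_to_root_py start child_to_parents max_depth)

-- ===== LEMMAS AND PROOFS =====

-- 'path is the predecessor chain recorded for n': what pvChase follows
inductive PvChain (pred : PySem.Dict String (Option String)) : String → List String → Prop
  | last {n : String} : pred.get? n = some none → PvChain pred n [n]
  | cons {n p : String} {l : List String} :
      pred.get? n = some (some p) → PvChain pred p l → PvChain pred n (n :: l)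

lemma pvChain_isSome {pred : PySem.Dict String (Option String)} {n : String} {l : List String}
    (h : PvChain pred n l) : ∀ x ∈ l, (pred.get? x).isSome := by
  induction h with
  | last hn =>
      intro x hx
      simp at hx
      subst hx
      simp [*]
  | cons hn _ ih =>
      intro x hx
      rcases List.mem_cons.1 hx with hx | hx
      · subst hx; simp [hn]
      · exact ih x hx

lemma pvChain_insert {pred : PySem.Dict String (Option String)} {n k : String}
    {l : List String} {v : Option String} (hk : pred.get? k = none)
    (h : PvChain pred n l) : PvChain (pred.insert k v) n l := by
  induction h with
  | @last m hm =>
      refine PvChain.last ?_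
      rw [PySem.Dict.get?_insert]
      have : m ≠ k := fun e => by rw [e, hk] at hm; cases hm
      simp [this, hm]
  | @cons m p l hm _ ih =>
      refine PvChain.cons ?_ ih
      rw [PySem.Dict.get?_insert]
      have : m ≠ k := fun e => by rw [e, hk] at hm; cases hm
      simp [this, hm]

lemma pvChase_eq {pred : PySem.Dict String (Option String)} {n : String} {l : List String}
    (h : PvChain pred n l) : ∀ f, l.length ≤ f + 1 → pvChase pred f n = l := by
  induction h with
  | @last m hm =>
      intro f _
      cases f with
      | zero => rfl
      | succ f => simp [pvChase, PySem.Dict.getD, hm]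
  | @cons m p l hm hc ih =>
      intro f hf
      cases f with
      | zero =>
          exfalso
          cases hc <;> simp at hf
      | succ f =>
          simp only [pvChase, PySem.Dict.getD, hm, Option.getD_some]
          have : l.length ≤ f + 1 := by simp at hf; omega
          rw [ih f this]

lemma pvChain_len_le {pred : PySem.Dict String (Option String)} {n : String} {l : List String}
    (h : PvChain pred n l) (hnd : l.Nodup) : l.length ≤ pred.size := by
  have hsub : l ⊆ pred.keys := by
    intro x hx
    have := pvChain_isSome h x hx
    by_contra hnk
    rw [(PySem.Dict.get?_eq_none_iff_not_mem_keys pred x).2 hnk] at this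
    simp at this
  have := (hnd.subperm hsub).length_le
  simpa [PySem.Dict.size, PySem.Dict.keys] using this

-- queue-pair correspondence between the two loops
def pvPairInv (pred : PySem.Dict String (Option String))
    (a : String × List String) (b : String × Int) : Prop :=
  b.1 = a.1 ∧ b.2 = (a.2.length : Int) ∧ PvChain pred a.1 a.2.reverse ∧ a.2.Nodup

lemma pvPairInv_insert {pred : PySem.Dict String (Option String)} {k : String} {v : Option String}
    {a : String × List String} {b : String × Int} (hk : pred.get? k = none)
    (h : pvPairInv pred a b) : pvPairInv (pred.insert k v) a b :=
  ⟨h.1, h.2.1, pvChain_insert hk h.2.2.1, h.2.2.2⟩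

-- BFS depth invariant: depths in the queue are nondecreasing and within 1 of the head
def pvDepthOK (ds : List Int) : Prop :=
  ds.Pairwise (· ≤ ·) ∧ ∀ x ∈ ds, x ≤ ds.headD 0 + 1

lemma pvDepthOK_append {d : Int} {t extra : List Int} (h : pvDepthOK (d :: t))
    (hex : ∀ x ∈ extra, x = d + 1) : pvDepthOK (t ++ extra) := by
  obtain ⟨hp, hb⟩ := h
  have hdt : ∀ x ∈ t, d ≤ x := (List.pairwise_cons.1 hp).1
  have hbt : ∀ x ∈ t, x ≤ d + 1 := fun x hx => by
    have := hb x (by simp [hx]); simpa using this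
  constructor
  · rw [List.pairwise_append]
    refine ⟨hp.of_cons, ?_, ?_⟩
    · exact List.pairwise_of_forall_mem_list fun a ha b hb => by rw [hex a ha, hex b hb]
    · intro x hx y hy; rw [hex y hy]; exact hbt x hx
  · intro x hx
    cases t with
    | nil =>
        simp only [List.nil_append] at hx ⊢
        cases extra with
        | nil => simp at hx
        | cons e es =>
            rw [hex x hx]
            simp only [List.headD_cons]
            rw [hex e (by simp)]
            omega
    | cons c t' =>
        have hdc : d ≤ c := hdt c (by simp)
        simp only [List.cons_append, List.headD_cons] at hx ⊢
        rcases List.mem_cons.1 hx with hx' | hx'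
        · omega
        · rcases List.mem_append.1 hx' with hx'' | hx''
          · have := hbt x (by simp [hx'']); omega
          · rw [hex x hx'']; omega

lemma pvF2_exists {pred : PySem.Dict String (Option String)}
    {qA : List (String × List String)} {qB : List (String × Int)}
    (h : List.Forall₂ (pvPairInv pred) qA qB) :
    ∀ a ∈ qA, ∃ b ∈ qB, pvPairInv pred a b := by
  induction h with
  | nil => intro a ha; simp at ha
  | cons hab _ ih =>
      intro a ha
      rcases List.mem_cons.1 ha with ha | ha
      · exact ⟨_, by simp, ha ▸ hab⟩
      · obtain ⟨b, hb, hr⟩ := ih a ha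
        exact ⟨b, by simp [hb], hr⟩

-- entries produced by A's push fold: old ones, or paths of length path.length + 1
lemma pvAfold_mem {path : List String} :
    ∀ (parents : List String) (s : List (String × List String) × PySem.Set String)
      (e : String × List String), e ∈ (parents.foldl (pvAstep path) s).1 →
      e ∈ s.1 ∨ ∃ x, e.2 = path ++ [x] := by
  intro parents
  induction parents with
  | nil => intro s e he; exact Or.inl he
  | cons p ps ih =>
      intro s e he
      rcases ih (pvAstep path s p) e he with h | h
      · unfold pvAstep at h
        split at h
        · exact Or.inl h
        · rcases List.mem_append.1 h with h' | h'
          · exact Or.inl h'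
          · simp at h'
            exact Or.inr ⟨p, by rw [h']⟩
      · exact Or.inr h

-- A's loop ignores every queue entry whose path is longer than max_depth
lemma pvAnone (ctp : List (String × List String)) (md : Int) :
    ∀ (fuel : Nat) (q : List (String × List String)) (vis : PySem.Set String),
      (∀ e ∈ q, md < (e.2.length : Int)) → pvAloop ctp md fuel q vis none = none := by
  intro fuel
  induction fuel with
  | zero => intro q vis _; rfl
  | succ f ih =>
      intro q vis hq
      cases q with
      | nil => rfl
      | cons hd rest =>
          obtain ⟨node, path⟩ := hd
          have : (path.length : Int) > md := hq (node, path) (by simp)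
          simp only [pvAloop, if_pos this]
          exact ih rest vis fun e he => hq e (by simp [he])

-- once best is set, no later candidate is strictly shorter, so A returns best unchanged
lemma pvAkeep (ctp : List (String × List String)) (md : Int) (b : List String) :
    ∀ (fuel : Nat) (q : List (String × List String)) (vis : PySem.Set String),
      (∀ e ∈ q, b.length ≤ e.2.length) → pvAloop ctp md fuel q vis (some b) = some b := by
  intro fuel
  induction fuel with
  | zero => intro q vis _; rfl
  | succ f ih =>
      intro q vis hq
      cases q with
      | nil => rfl
      | cons hd rest =>
          obtain ⟨node, path⟩ := hd
          have hrest : ∀ e ∈ rest, b.length ≤ e.2.length :=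
            fun e he => hq e (by simp [he])
          by_cases hmd : (path.length : Int) > md
          · simp only [pvAloop, if_pos hmd]
            exact ih rest vis hrest
          · simp only [pvAloop, if_neg hmd]
            by_cases hpar : ((PySem.Dict.mk ctp).getD node []).isEmpty
            · simp only [hpar]
              have hlen : b.length ≤ path.length := hq (node, path) (by simp)
              have : ¬ path.reverse.length < b.length := by
                simp only [List.length_reverse]; omega
              simp only [this]
              exact ih rest vis hrest
            · simp only [hpar]
              rw [if_neg (by simp_all)]
              refine ih _ _ ?_
              intro e he
              rcases pvAfold_mem _ _ e he with h | ⟨x, hx⟩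
              · exact hrest e h
              · rw [hx]
                have h2 : b.length ≤ path.length := hq (node, path) (by simp)
                simp
                omega

lemma pvF2_append {α β : Type} {R : α → β → Prop} {l₁ : List α} {u₁ : List α}
    {l₂ : List β} {u₂ : List β} (h : List.Forall₂ R l₁ l₂) (h2 : List.Forall₂ R u₁ u₂) :
    List.Forall₂ R (l₁ ++ u₁) (l₂ ++ u₂) := by
  induction h with
  | nil => exact h2
  | cons hab _ ih => exact List.Forall₂.cons hab ih

-- the push folds of the two loops stay in lockstep
lemma pvFoldSim (n : String) (path : List String) (d : Int)
    (hd : d = (path.length : Int)) (hnd : path.Nodup) :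
    ∀ (parents : List String) (qA : List (String × List String)) (qB : List (String × Int))
      (vis : PySem.Set String) (pred : PySem.Dict String (Option String)),
      (∀ s, s ∈ vis ↔ (pred.get? s).isSome = true) →
      PvChain pred n path.reverse →
      List.Forall₂ (pvPairInv pred) qA qB →
      (∀ s, s ∈ (parents.foldl (pvAstep path) (qA, vis)).2 ↔
        (((parents.foldl (pvBstep n d) (qB, pred)).2).get? s).isSome = true) ∧
      List.Forall₂ (pvPairInv (parents.foldl (pvBstep n d) (qB, pred)).2)
        (parents.foldl (pvAstep path) (qA, vis)).1
        (parents.foldl (pvBstep n d) (qB, pred)).1 ∧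
      (∃ extra, (parents.foldl (pvBstep n d) (qB, pred)).1 = qB ++ extra ∧
        ∀ e ∈ extra, e.2 = d + 1) := by
  intro parents
  induction parents with
  | nil =>
      intro qA qB vis pred hvis hchain hf2
      exact ⟨hvis, hf2, [], by simp, by simp⟩
  | cons p ps ih =>
      intro qA qB vis pred hvis hchain hf2
      by_cases hp : p ∈ vis
      · have hpB : pred.contains p = true := by
          rw [PySem.Dict.contains_eq_isSome_get?]; exact (hvis p).1 hp
        have hA : pvAstep path (qA, vis) p = (qA, vis) := by
          simp [pvAstep, hp]
        have hB : pvBstep n d (qB, pred) p = (qB, pred) := by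
          simp [pvBstep, hpB]
        simp only [List.foldl_cons, hA, hB]; exact ih qA qB vis pred hvis hchain hf2
      · have hpn : pred.get? p = none := by
          rcases h : pred.get? p with _ | v
          · rfl
          · exact absurd ((hvis p).2 (by simp [h])) hp
        have hpB : ¬ pred.contains p = true := by
          rw [PySem.Dict.contains_eq_isSome_get?, hpn]; simp
        have hA : pvAstep path (qA, vis) p
            = (qA ++ [(p, path ++ [p])], PySem.Set.add vis p) := by
          simp [pvAstep, hp]
        have hB : pvBstep n d (qB, pred) p
            = (qB ++ [(p, d + 1)], pred.insert p (some n)) := by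
          simp [pvBstep, hpB]
        -- p is not on the current path (its elements are all recorded in pred)
        have hpnotpath : p ∉ path := by
          intro hmem
          have := pvChain_isSome hchain p (by simpa using hmem)
          rw [hpn] at this; simp at this
        have hvis' : ∀ s, s ∈ PySem.Set.add vis p ↔
            ((pred.insert p (some n)).get? s).isSome = true := by
          intro s
          rw [PySem.Set.mem_add, PySem.Dict.get?_insert]
          by_cases hs : s = p
          · simp [hs]
          · simp [hs, hvis s]
        have hchain' : PvChain (pred.insert p (some n)) n path.reverse :=
          pvChain_insert hpn hchain
        have hnewpair : pvPairInv (pred.insert p (some n)) (p, path ++ [p]) (p, d + 1) := by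
          refine ⟨rfl, by simp [hd], ?_, ?_⟩
          · simp only [List.reverse_append, List.reverse_cons, List.reverse_nil,
              List.nil_append, List.singleton_append]
            exact PvChain.cons (by rw [PySem.Dict.get?_insert]; simp) hchain'
          · exact List.Nodup.append hnd (List.nodup_singleton p)
              (List.disjoint_singleton.2 hpnotpath)
        have hf2' : List.Forall₂ (pvPairInv (pred.insert p (some n)))
            (qA ++ [(p, path ++ [p])]) (qB ++ [(p, d + 1)]) := by
          refine pvF2_append ?_ (List.Forall₂.cons hnewpair List.Forall₂.nil)
          exact List.Forall₂.imp (fun a b hab => pvPairInv_insert hpn hab) hf2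
        obtain ⟨hv, hfa, extra, hex, hexd⟩ :=
          ih _ _ _ _ hvis' hchain' hf2'
        refine ⟨by simp only [List.foldl_cons, hA, hB]; exact hv,
          by simp only [List.foldl_cons, hA, hB]; exact hfa, ?_⟩
        refine ⟨(p, d + 1) :: extra, ?_, ?_⟩
        · simp only [List.foldl_cons, hB] at hex ⊢
          rw [hex, List.append_assoc]; rfl
        · intro e he
          rcases List.mem_cons.1 he with he | he
          · rw [he]
          · exact hexd e he

-- the simulation: from related states the two loops return the same result
lemma pvSim (ctp : List (String × List String)) (md : Int) :
    ∀ (fuel : Nat) (qA : List (String × List String)) (qB : List (String × Int))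
      (vis : PySem.Set String) (pred : PySem.Dict String (Option String)),
      (∀ s, s ∈ vis ↔ (pred.get? s).isSome = true) →
      List.Forall₂ (pvPairInv pred) qA qB →
      pvDepthOK (qB.map (fun e => e.2)) →
      pvAloop ctp md fuel qA vis none = pvBloop ctp md fuel qB pred := by
  intro fuel
  induction fuel with
  | zero => intro qA qB vis pred _ _ _; rfl
  | succ f ih =>
      intro qA qB vis pred hvis hf2 hdok
      cases hf2 with
      | nil => rfl
      | @cons a b restA restB hab hf2' =>
          obtain ⟨node, path⟩ := a
          obtain ⟨node', dpt⟩ := b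
          obtain ⟨hb1, hb2, hchain, hnd⟩ := hab
          simp only at hb1 hb2 hchain hnd
          subst hb1 hb2
          have hdge : ∀ x ∈ restB.map (fun e => e.2), (path.length : Int) ≤ x :=
            (List.pairwise_cons.1 hdok.1).1
          by_cases hmd : (path.length : Int) > md
          · -- B breaks; all of A's remaining entries are too deep as well
            simp only [pvAloop, pvBloop, if_pos hmd]
            refine pvAnone ctp md f restA vis ?_
            intro e he
            obtain ⟨bb, hbb, hinv⟩ := pvF2_exists hf2' e he
            have : bb.2 ∈ restB.map (fun e => e.2) := List.mem_map.2 ⟨bb, hbb, rfl⟩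
            have := hdge _ this
            rw [hinv.2.1] at this
            omega
          · simp only [pvAloop, pvBloop, if_neg hmd]
            by_cases hpar : ((PySem.Dict.mk ctp).getD node' []).isEmpty
            · -- a root: B returns the chased path, A sets best and keeps it
              simp only [hpar]
              have hchase : pvChase pred pred.size node' = path.reverse := by
                refine pvChase_eq hchain pred.size ?_
                have := pvChain_len_le hchain (by simpa using hnd)
                simp only [List.length_reverse] at this ⊢
                omega
              rw [hchase]
              exact pvAkeep ctp md path.reverse f restA vis fun e he => by
                obtain ⟨bb, hbb, hinv⟩ := pvF2_exists hf2' e he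
                have : bb.2 ∈ restB.map (fun e => e.2) := List.mem_map.2 ⟨bb, hbb, rfl⟩
                have h1 := hdge _ this
                rw [hinv.2.1] at h1
                simp only [List.length_reverse]
                omega
            · -- both loops push the unvisited parents and continue
              simp only [hpar]
              rw [if_neg (by simp_all), if_neg (by simp_all)]
              obtain ⟨hvis', hfa, extra, hex, hexd⟩ :=
                pvFoldSim node' path (path.length : Int) rfl hnd
                  ((PySem.Dict.mk ctp).getD node' []) restA restB vis pred hvis hchain hf2'
              refine ih _ _ _ _ hvis' hfa ?_
              rw [hex, List.map_append]
              exact pvDepthOK_append hdok fun x hx => by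
                obtain ⟨e, he, hxe⟩ := List.mem_map.1 hx
                rw [← hxe]; exact hexd e he

-- ===== VERDICT (by name: the statement is the Claim_ definition above) =====
theorem bfs_path_to_root_py_spec : Claim_equal_bfs_path_to_root_py := by
  intro start ctp md _
  show bfs_path_to_root_py start ctp md = bfs_path_to_root_py_alt start ctp md
  unfold bfs_path_to_root_py bfs_path_to_root_py_alt
  refine pvSim ctp md _ _ _ _ _ ?_ ?_ ?_
  · intro s
    rw [PySem.Dict.get?_insert]
    constructor
    · intro hs
      have : s = start := by
        simpa [PySem.Set.add, PySem.Set.empty] using hs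
      simp [this]
    · intro hs
      by_cases h : s = start
      · simp [h, PySem.Set.add, PySem.Set.empty]
      · rw [if_neg h, PySem.Dict.get?_empty] at hs; simp at hs
  · refine List.Forall₂.cons ?_ List.Forall₂.nil
    exact ⟨rfl, by simp, PvChain.last (by rw [PySem.Dict.get?_insert]; simp), by simp⟩
  · exact ⟨by simp, by simp⟩
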